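-- pv_equiv track=rewrite | github.com/jianghaowenjhw/Cylinder-liner-salt-bath-report | main.py | clear_abnormal_characters
-- ===== SOURCE A (Python) =====
-- def clear_abnormal_characters(
--     identification: str
-- ) -> str:
--     '''
--     把identification中的除数字和空格外的所有字符变成空格, 并把连续的空格变成一个空格, 最后清除首尾的空格
--     '''
--     result = ""
--     # 非数字和空格的字符变成空格
--     for char in identification:
--         if char.isdigit() or char.isspace():
--             result += char
--         else:
--             result += " "
--     # 连续的空格变成一个空格, 清除首尾的空格
--     result = " ".join(result.split())
--     return result
-- ===== SOURCE B (Python) =====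
-- def clear_abnormal_characters(
--     identification: str
-- ) -> str:
--     # Single-pass tokenizer: collect maximal runs of digit characters and
--     # join them with single spaces; everything else is a separator.
--     tokens = []
--     buf = []
--     for c in identification:
--         if c.isdigit():
--             buf.append(c)
--         elif buf:
--             tokens.append("".join(buf))
--             buf = []
--     if buf:
--         tokens.append("".join(buf))
--     return " ".join(tokens)
-- ===== Notes on version B (the rewrite author's own statement) =====
-- stated objective: faster
-- what changed: Replaced build-replaced-string-then-split-then-join by a single-pass tokenizer that accumulates maximal digit runs in a buffer and flushes them as tokens, never materialising the intermediate replaced string via repeated string concatenation.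
import Mathlib
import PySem

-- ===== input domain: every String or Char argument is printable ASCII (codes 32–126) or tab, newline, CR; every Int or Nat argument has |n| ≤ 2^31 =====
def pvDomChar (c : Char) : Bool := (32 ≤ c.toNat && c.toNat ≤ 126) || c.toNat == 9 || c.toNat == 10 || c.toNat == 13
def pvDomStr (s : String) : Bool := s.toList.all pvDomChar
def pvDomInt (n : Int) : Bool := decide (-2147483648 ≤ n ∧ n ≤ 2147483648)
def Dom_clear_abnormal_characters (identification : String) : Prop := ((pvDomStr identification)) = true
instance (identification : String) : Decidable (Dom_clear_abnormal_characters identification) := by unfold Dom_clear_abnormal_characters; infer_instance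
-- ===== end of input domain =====

-- B replaces A's "replace non-digit/space by space, then split and rejoin" with a
-- single-pass tokenizer that flushes maximal digit runs; same result, simpler flow.


-- ===== PORT A =====
-- result is accumulated as a List Char (Python's string concatenation, exact on code points)
def clear_abnormal_characters (identification : String) : String :=
  let result : List Char :=
    identification.toList.foldl
      (fun r c => r ++ [if PySem.Chars.isdigit c || PySem.Chars.isspace c then c else ' ']) []
  String.ofList (PySem.Chars.join [' '] (PySem.Chars.split₀ result))

-- ===== PORT B =====
-- one step of B's loop: digits are buffered, anything else flushes the buffer
def pvAltStep (st : List (List Char) × List Char) (c : Char) : List (List Char) × List Char :=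
  if PySem.Chars.isdigit c then (st.1, st.2 ++ [c])
  else if st.2.isEmpty then st else (st.1 ++ [st.2], [])

def clear_abnormal_characters_alt (identification : String) : String :=
  let st := identification.toList.foldl pvAltStep ([], [])
  let toks := if st.2.isEmpty then st.1 else st.1 ++ [st.2]
  String.ofList (PySem.Chars.join [' '] toks)

-- ===== PRECONDITION & SPEC =====
def Spec_clear_abnormal_characters (identification : String) (out : String) : Prop := out = clear_abnormal_characters_alt identification
instance (identification : String) (out : String) : Decidable (Spec_clear_abnormal_characters identification out) := by unfold Spec_clear_abnormal_characters; infer_instance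

-- ===== CLAIM (what is proved, stated in full; the proofs are below) =====
def Claim_equal_clear_abnormal_characters : Prop := ∀ (identification : String), Dom_clear_abnormal_characters identification → Spec_clear_abnormal_characters identification (clear_abnormal_characters identification)

-- ===== LEMMAS AND PROOFS =====

-- A's replacement map
def pvRepl (c : Char) : Char := if PySem.Chars.isdigit c || PySem.Chars.isspace c then c else ' '

lemma pvRepl_foldl (cs : List Char) : ∀ (r : List Char),
    cs.foldl (fun r c => r ++ [pvRepl c]) r = r ++ cs.map pvRepl := by
  induction cs with
  | nil => simp
  | cons c cs ih => intro r; simp [List.foldl, ih]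

lemma pvRepl_digit (c : Char) (h : PySem.Chars.isdigit c = true) : pvRepl c = c := by
  simp [pvRepl, h]

lemma pvRepl_space_of_not_digit (c : Char) (h : PySem.Chars.isdigit c = false) :
    PySem.Chars.isspace (pvRepl c) = true := by
  unfold pvRepl
  by_cases hs : PySem.Chars.isspace c = true
  · simp [h, hs]
  · simp [h, hs]; decide

lemma digit_not_space (c : Char) (h : PySem.Chars.isdigit c = true) :
    PySem.Chars.isspace c = false := by
  simp only [PySem.Chars.isdigit, Bool.and_eq_true, decide_eq_true_eq] at h
  have h1 : 48 ≤ c.toNat := by simpa [Char.le_def] using h.1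
  have h2 : c.toNat ≤ 57 := by simpa [Char.le_def] using h.2
  simp only [PySem.Chars.isspace]
  simp only [Bool.or_eq_false_iff, Bool.and_eq_false_iff, decide_eq_false_iff_not]
  omega

-- the core invariant: running split₀.go on the replaced suffix from state (cur, acc)
-- equals finishing B's fold from the corresponding state (acc.reverse, cur.reverse)
lemma go_eq_fold (cs : List Char) : ∀ (cur : List Char) (acc : List (List Char)),
    PySem.Chars.split₀.go (cs.map pvRepl) cur acc =
      (let st := cs.foldl pvAltStep (acc.reverse, cur.reverse)
       if st.2.isEmpty then st.1 else st.1 ++ [st.2]) := by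
  induction cs with
  | nil =>
      intro cur acc
      simp only [List.map_nil, List.foldl_nil, PySem.Chars.split₀.go]
      by_cases h : cur.isEmpty
      · simp_all
      · have : cur.reverse.isEmpty = false := by
          simp only [List.isEmpty_reverse]; simpa using h
        simp [h, this]
  | cons c cs ih =>
      intro cur acc
      by_cases hd : PySem.Chars.isdigit c = true
      · have hr : pvRepl c = c := pvRepl_digit c hd
        have hs : PySem.Chars.isspace c = false := digit_not_space c hd
        simp only [List.map_cons, List.foldl_cons, PySem.Chars.split₀.go, hr, hs,
          Bool.false_eq_true, if_false, pvAltStep, hd, if_true]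
        have := ih (c :: cur) acc
        simpa using this
      · have hd' : PySem.Chars.isdigit c = false := by simpa using hd
        have hs : PySem.Chars.isspace (pvRepl c) = true := pvRepl_space_of_not_digit c hd'
        simp only [List.map_cons, List.foldl_cons, PySem.Chars.split₀.go, hs, if_true,
          pvAltStep, hd', Bool.false_eq_true, if_false]
        by_cases hc : cur.isEmpty
        · have hcr : cur.reverse.isEmpty = true := by
            simp only [List.isEmpty_reverse]; exact hc
          have hnil : cur = [] := by simpa using hc
          simp only [hc, if_true, hcr, if_true]
          have := ih [] acc
          simpa [hnil] using this
        · have hcr : cur.reverse.isEmpty = false := by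
            simp only [List.isEmpty_reverse]; simpa using hc
          simp only [hc, hcr]
          have := ih [] (cur.reverse :: acc)
          simpa using this

-- ===== VERDICT (by name: the statement is the Claim_ definition above) =====
theorem clear_abnormal_characters_spec : Claim_equal_clear_abnormal_characters := by
  intro s _
  unfold Spec_clear_abnormal_characters clear_abnormal_characters clear_abnormal_characters_alt
  have h1 : s.toList.foldl
      (fun r c => r ++ [if PySem.Chars.isdigit c || PySem.Chars.isspace c then c else ' ']) []
      = s.toList.map pvRepl := by
    have := pvRepl_foldl s.toList []
    simpa [pvRepl] using this
  rw [h1]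
  have h2 := go_eq_fold s.toList [] []
  simp only [PySem.Chars.split₀]
  rw [h2]
  simp
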